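-- pv_equiv track=rewrite | github.com/Ballareka/F7SJ2X | 5.feladat.py | convertToBase3
-- ===== SOURCE A (Python) =====
-- def convertToBase3(x):                           # a számjegyekhez az összes lehetőségbeli operátort hozzá kell rendelni,
--     number,i=0,0                                 # ezért a ciklusváltozót átváltjuk 3-as számrendszerbe
--     while(x !=0):                                # ezekkel címezzük az operátort, amit használunk
--         modulo = x % 3
--         number=number + modulo * pow(10,i)
--         x=x //3
--         i+=1
--     return number
-- ===== SOURCE B (Python) =====
-- def convertToBase3(x):
--     if x == 0:
--         return 0
--     return convertToBase3(x // 3) * 10 + x % 3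
-- ===== Notes on version B (the rewrite author's own statement) =====
-- stated objective: simpler
-- what changed: Replaces the iterative loop with counter i and pow(10,i) by a direct tail recurrence convertToBase3(x//3)*10 + x%3, removing the explicit digit-position state.
import Mathlib
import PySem

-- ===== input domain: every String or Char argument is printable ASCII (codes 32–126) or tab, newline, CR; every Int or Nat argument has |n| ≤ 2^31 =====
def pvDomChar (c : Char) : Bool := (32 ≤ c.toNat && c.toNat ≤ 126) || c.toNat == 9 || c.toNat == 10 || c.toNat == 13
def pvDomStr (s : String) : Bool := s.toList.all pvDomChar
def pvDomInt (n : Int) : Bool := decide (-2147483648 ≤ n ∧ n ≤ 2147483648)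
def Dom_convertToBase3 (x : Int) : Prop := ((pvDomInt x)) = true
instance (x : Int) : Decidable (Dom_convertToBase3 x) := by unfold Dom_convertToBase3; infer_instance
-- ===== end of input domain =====

-- B replaces A's loop (counter i, pow(10,i)) by the direct recurrence alt(x//3)*10 + x%3: simpler, same cost.
-- ===== PORT A =====
-- while(x != 0): body; the '0 < x' guard makes the recursion total in Lean (for x < 0 Python A loops forever;
-- those inputs are excluded by Pre_convertToBase3, so the guard only serves termination).
def convertToBase3.loop (x number : Int) (i : Nat) : Int :=
  if h : 0 < x then
    let modulo := PySem.Int.mod x 3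
    convertToBase3.loop (PySem.Int.floordiv x 3) (number + modulo * 10 ^ i) (i + 1)
  else number
termination_by x.toNat
decreasing_by
  rw [PySem.Int.floordiv_eq_ediv_of_pos (by omega)]
  omega

def convertToBase3 (x : Int) : Int := convertToBase3.loop x 0 0

-- ===== PORT B =====
-- if x == 0: return 0; else return convertToBase3(x//3)*10 + x%3; same '0 < x' totality guard
-- (for x < 0 Python B hits RecursionError; excluded by Pre_convertToBase3).
def convertToBase3_alt (x : Int) : Int :=
  if h : 0 < x then
    convertToBase3_alt (PySem.Int.floordiv x 3) * 10 + PySem.Int.mod x 3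
  else 0
termination_by x.toNat
decreasing_by
  rw [PySem.Int.floordiv_eq_ediv_of_pos (by omega)]
  omega

-- ===== PRECONDITION & SPEC =====
-- Pre_ excludes x < 0: there Python A loops forever and Python B exceeds the recursion limit (no value is returned).
def Pre_convertToBase3 (x : Int) : Prop := 0 ≤ x
instance (x : Int) : Decidable (Pre_convertToBase3 x) := by unfold Pre_convertToBase3; infer_instance
def pvWitness_convertToBase3 : Int := 11

def Spec_convertToBase3 (x : Int) (out : Int) : Prop := out = convertToBase3_alt x
instance (x : Int) (out : Int) : Decidable (Spec_convertToBase3 x out) := by unfold Spec_convertToBase3; infer_instance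

-- ===== CLAIM (what is proved, stated in full; the proofs are below) =====
def Claim_equal_convertToBase3 : Prop := ∀ (x : Int), Dom_convertToBase3 x → Pre_convertToBase3 x → Spec_convertToBase3 x (convertToBase3 x)

-- ===== LEMMAS AND PROOFS =====
theorem loop_eq (k : Nat) : ∀ (x : Int), x.toNat = k → 0 ≤ x →
    ∀ (n : Int) (i : Nat), convertToBase3.loop x n i = n + convertToBase3_alt x * 10 ^ i := by
  induction k using Nat.strong_induction_on with
  | _ k ih =>
    intro x hk hx n i
    rw [convertToBase3.loop, convertToBase3_alt]
    by_cases h : 0 < x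
    · have hd : PySem.Int.floordiv x 3 = x / 3 := PySem.Int.floordiv_eq_ediv_of_pos (by omega)
      rw [dif_pos h, dif_pos h,
        ih (PySem.Int.floordiv x 3).toNat (by rw [hd]; omega) _ rfl (by rw [hd]; omega)]
      ring
    · rw [dif_neg h, dif_neg h]; ring

-- ===== VERDICT (by name: the statement is the Claim_ definition above) =====
theorem convertToBase3_spec : Claim_equal_convertToBase3 := by
  intro x _ hx
  unfold Spec_convertToBase3 convertToBase3
  rw [loop_eq x.toNat x rfl hx 0 0]
  ring
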